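-- pv_equiv track=rewrite | github.com/Liuhr1234/pyxll | Drisk/formula_parser.py | is_attribute_function
-- ===== SOURCE A (Python) =====
-- ATTRIBUTE_FUNCTIONS = [
--     "DriskName", "DriskLoc", "DriskCategory", "DriskCollect", "DriskConvergence",
--     "DriskCopula", "DriskCorrmat", "DriskFit", "DriskIsDate", "DriskIsDiscrete",
--     "DriskLock", "DriskSeed", "DriskShift", "DriskStatic", "DriskTruncate",
--     "DriskTruncateP", "DriskTruncate2", "DriskTruncateP2", "DriskUnits",
--     "DriskMakeInput"
-- ]
--
-- def is_attribute_function(formula: str) -> bool: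
--     """检查公式是否包含属性函数"""
--     if not isinstance(formula, str):
--         return False
--
--     formula_upper = formula.upper()
--     for func in ATTRIBUTE_FUNCTIONS:
--         if func.upper() in formula_upper:
--             return True
--
--     return False
-- ===== SOURCE B (Python) =====
-- # Attribute names all read "drisk" + suffix (case-insensitively), and the short
-- # suffixes 'loc' / 'truncate' already cover the longer names that extend them
-- # (DriskLock, DriskTruncateP/2, ...): any occurrence of a longer name contains
-- # the shorter attribute name.  So B lowercases the formula once and walks it
-- # position by position looking only for the shared stem "drisk"; at a hit it
-- # dispatches on the next character into a small dict of minimal suffixes.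
-- _SUFFIX_BY_FIRST = {
--     "n": ("name",),
--     "l": ("loc",),
--     "c": ("category", "collect", "convergence", "copula", "corrmat"),
--     "f": ("fit",),
--     "i": ("isdate", "isdiscrete"),
--     "s": ("seed", "shift", "static"),
--     "t": ("truncate",),
--     "u": ("units",),
--     "m": ("makeinput",),
-- }
--
--
-- def _tail_ok(s, j):
--     for suf in _SUFFIX_BY_FIRST.get(s[j:j + 1], ()):
--         if s.startswith(suf, j):
--             return True
--     return False
--
--
-- def _scan(s):
--     for i in range(len(s)):
--         if s.startswith("drisk", i) and _tail_ok(s, i + 5):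
--             return True
--     return False
--
--
-- def is_attribute_function(formula: str) -> bool:
--     """检查公式是否包含属性函数"""
--     if not isinstance(formula, str):
--         return False
--     return _scan(formula.lower())
-- ===== Notes on version B (the rewrite author's own statement) =====
-- stated objective: alternative
-- what changed: A runs 20 independent case-insensitive substring scans, one per attribute name; B lowercases the formula once, walks it position by position looking only for the shared stem 'drisk', and on a hit dispatches on the next character into a dict of 16 minimal suffixes (prefix-subsumed names like DriskLock/DriskTruncateP collapse into loc/truncate).
import Mathlib
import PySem

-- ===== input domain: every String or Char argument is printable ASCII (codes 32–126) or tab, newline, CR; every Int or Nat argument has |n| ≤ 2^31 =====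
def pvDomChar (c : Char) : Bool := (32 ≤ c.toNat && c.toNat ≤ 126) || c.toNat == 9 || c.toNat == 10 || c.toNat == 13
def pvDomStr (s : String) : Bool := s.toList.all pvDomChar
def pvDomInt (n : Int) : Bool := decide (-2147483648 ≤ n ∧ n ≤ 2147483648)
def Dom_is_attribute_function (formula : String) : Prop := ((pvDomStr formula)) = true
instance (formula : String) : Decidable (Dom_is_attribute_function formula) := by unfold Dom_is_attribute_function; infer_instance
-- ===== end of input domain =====

-- B replaces A's 20 independent case-insensitive substring scans by one lowercase position-by-position
-- walk for the shared stem "drisk" with a first-character dict dispatch into 16 minimal suffixes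
-- (objective: alternative).

-- ===== PORT A =====
def pvAttrFunctions : List String :=
  ["DriskName", "DriskLoc", "DriskCategory", "DriskCollect", "DriskConvergence",
   "DriskCopula", "DriskCorrmat", "DriskFit", "DriskIsDate", "DriskIsDiscrete",
   "DriskLock", "DriskSeed", "DriskShift", "DriskStatic", "DriskTruncate",
   "DriskTruncateP", "DriskTruncate2", "DriskTruncateP2", "DriskUnits",
   "DriskMakeInput"]

-- the for-loop with early return: 'if func.upper() in formula_upper: return True'
def pvALoop (fu : List Char) : List String → Bool
  | [] => false
  | f :: rest =>
    if PySem.Chars.isIn (PySem.Chars.upper f.toList) fu then true else pvALoop fu rest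

def is_attribute_function (formula : String) : Bool :=
  pvALoop (PySem.Chars.upper formula.toList) pvAttrFunctions

-- ===== PORT B =====
-- the dict _SUFFIX_BY_FIRST of Source B
def pvSufByFirst : PySem.Dict (List Char) (List (List Char)) :=
  PySem.Dict.ofList
    [("n".toList, ["name".toList]),
     ("l".toList, ["loc".toList]),
     ("c".toList, ["category".toList, "collect".toList, "convergence".toList,
                   "copula".toList, "corrmat".toList]),
     ("f".toList, ["fit".toList]),
     ("i".toList, ["isdate".toList, "isdiscrete".toList]),
     ("s".toList, ["seed".toList, "shift".toList, "static".toList]),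
     ("t".toList, ["truncate".toList]),
     ("u".toList, ["units".toList]),
     ("m".toList, ["makeinput".toList])]

-- '_tail_ok(s, j)': for suf in _SUFFIX_BY_FIRST.get(s[j:j+1], ()): if s.startswith(suf, j): return True
-- (s.startswith(suf, j) is ported as a prefix test on s.drop j.toNat — exact for the 0 ≤ j the caller passes)
def pvTailOkAt (s : List Char) (j : Int) : Bool :=
  (PySem.Dict.getD pvSufByFirst (PySem.List.slice s (some j) (some (j + 1))) []).any
    (fun suf => PySem.Chars.startswith (s.drop j.toNat) suf)

-- '_scan': for i in range(len(s)): if s.startswith("drisk", i) and _tail_ok(s, i + 5): return True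
def pvScanLoop (s : List Char) : List Int → Bool
  | [] => false
  | i :: rest =>
    if PySem.Chars.startswith (s.drop i.toNat) "drisk".toList && pvTailOkAt s (i + 5) then true
    else pvScanLoop s rest

def pvScan (s : List Char) : Bool :=
  pvScanLoop s (PySem.List.pyRange 0 (s.length : Int) 1)

def is_attribute_function_alt (formula : String) : Bool :=
  pvScan (PySem.Chars.lower formula.toList)

-- ===== PRECONDITION & SPEC =====
def Spec_is_attribute_function (formula : String) (out : Bool) : Prop := out = is_attribute_function_alt formula
instance (formula : String) (out : Bool) : Decidable (Spec_is_attribute_function formula out) := by unfold Spec_is_attribute_function; infer_instance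

-- ===== CLAIM (what is proved, stated in full; the proofs are below) =====
def Claim_equal_is_attribute_function : Prop := ∀ (formula : String), Dom_is_attribute_function formula → Spec_is_attribute_function formula (is_attribute_function formula)

-- ===== LEMMAS AND PROOFS =====

-- position-free form of _tail_ok, a proof-side helper
def pvTailOk (rest : List Char) : Bool :=
  (PySem.Dict.getD pvSufByFirst (PySem.List.slice rest none (some 1)) []).any
    (fun suf => PySem.Chars.startswith rest suf)

-- the 16 minimal suffixes, flattened (proof-side view of pvSufByFirst's values)
def pvMin : List (List Char) :=
  ["name".toList, "loc".toList, "category".toList, "collect".toList, "convergence".toList,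
   "copula".toList, "corrmat".toList, "fit".toList, "isdate".toList, "isdiscrete".toList,
   "seed".toList, "shift".toList, "static".toList, "truncate".toList, "units".toList,
   "makeinput".toList]

-- case-folding arithmetic
theorem pv_toNat_ofNat (n : Nat) (h : n < 55296) : (Char.ofNat n).toNat = n := by
  unfold Char.ofNat
  rw [dif_pos (Or.inl h)]
  rfl

theorem pv_toNat_lowerChar (c : Char) :
    (PySem.Chars.lowerChar c).toNat =
      if 65 ≤ c.toNat ∧ c.toNat ≤ 90 then c.toNat + 32 else c.toNat := by
  simp only [PySem.Chars.lowerChar, PySem.Chars.isupper, Bool.and_eq_true, decide_eq_true_eq,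
    Char.le_def]
  have h1 : ('A').toNat = 65 := rfl
  have h2 : ('Z').toNat = 90 := rfl
  split_ifs with h h' h'
  · exact pv_toNat_ofNat _ (by omega)
  · exact absurd ⟨h.1, h.2⟩ h'
  · exact absurd ⟨h'.1, h'.2⟩ h
  · rfl

theorem pv_toNat_upperChar (c : Char) :
    (PySem.Chars.upperChar c).toNat =
      if 97 ≤ c.toNat ∧ c.toNat ≤ 122 then c.toNat - 32 else c.toNat := by
  simp only [PySem.Chars.upperChar, PySem.Chars.islower, Bool.and_eq_true, decide_eq_true_eq,
    Char.le_def]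
  have h1 : ('a').toNat = 97 := rfl
  have h2 : ('z').toNat = 122 := rfl
  split_ifs with h h' h'
  · exact pv_toNat_ofNat _ (by omega)
  · exact absurd ⟨h.1, h.2⟩ h'
  · exact absurd ⟨h'.1, h'.2⟩ h
  · rfl

theorem pv_char_toNat_inj (x y : Char) : x = y ↔ x.toNat = y.toNat := by
  constructor
  · intro h; rw [h]
  · intro h; exact Char.ext (UInt32.toNat_inj.mp h)

-- two chars agree after upper-casing iff they agree after lower-casing
theorem pv_case_iff (x y : Char) :
    (PySem.Chars.upperChar x = PySem.Chars.upperChar y) ↔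
    (PySem.Chars.lowerChar x = PySem.Chars.lowerChar y) := by
  rw [pv_char_toNat_inj, pv_char_toNat_inj, pv_toNat_lowerChar, pv_toNat_lowerChar,
    pv_toNat_upperChar, pv_toNat_upperChar]
  have hx : x.toNat < 4294967296 := x.val.toNat_lt_size
  have hy : y.toNat < 4294967296 := y.val.toNat_lt_size
  split_ifs <;> omega

theorem pv_prefix_case_iff (a b : List Char) :
    (a.map PySem.Chars.upperChar <+: b.map PySem.Chars.upperChar) ↔
    (a.map PySem.Chars.lowerChar <+: b.map PySem.Chars.lowerChar) := by
  induction a generalizing b with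
  | nil => simp
  | cons x a ih =>
    cases b with
    | nil =>
      simp only [List.map_nil, List.map_cons]
      constructor <;> (intro h; exact absurd (List.IsPrefix.length_le h) (by simp))
    | cons y b =>
      simp only [List.map_cons, List.cons_prefix_cons, ih, pv_case_iff x y]

set_option maxRecDepth 4096 in
theorem pvTailOk_iff (rest : List Char) :
    pvTailOk rest = true ↔ ∃ m ∈ pvMin, m <+: rest := by
  cases rest with
  | nil => decide
  | cons c r =>
    have h1 : PySem.List.slice (c :: r) none (some 1) = [c] := by
      rw [PySem.List.slice_to (c :: r) (by norm_num)]; rfl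
    have hD : pvSufByFirst = PySem.Dict.mk
        [("n".toList, ["name".toList]),
         ("l".toList, ["loc".toList]),
         ("c".toList, ["category".toList, "collect".toList, "convergence".toList,
                       "copula".toList, "corrmat".toList]),
         ("f".toList, ["fit".toList]),
         ("i".toList, ["isdate".toList, "isdiscrete".toList]),
         ("s".toList, ["seed".toList, "shift".toList, "static".toList]),
         ("t".toList, ["truncate".toList]),
         ("u".toList, ["units".toList]),
         ("m".toList, ["makeinput".toList])] := by decide
    rw [pvTailOk, h1, hD]
    simp only [PySem.Dict.getD, PySem.Dict.get?_mk_cons]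
    split_ifs with hn hl hc hf hi hs ht hu hm
    · obtain rfl : c = 'n' := by
        simp only [beq_iff_eq, String.toList] at hn
        exact (List.cons.injEq _ _ _ _ ▸ hn).1.symm
      simp [pvMin, PySem.Chars.startswith_iff, List.cons_prefix_cons]
    · obtain rfl : c = 'l' := by
        simp only [beq_iff_eq, String.toList] at hl
        exact (List.cons.injEq _ _ _ _ ▸ hl).1.symm
      simp [pvMin, PySem.Chars.startswith_iff, List.cons_prefix_cons]
    · obtain rfl : c = 'c' := by
        simp only [beq_iff_eq, String.toList] at hc
        exact (List.cons.injEq _ _ _ _ ▸ hc).1.symm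
      simp [pvMin, PySem.Chars.startswith_iff, List.cons_prefix_cons]
    · obtain rfl : c = 'f' := by
        simp only [beq_iff_eq, String.toList] at hf
        exact (List.cons.injEq _ _ _ _ ▸ hf).1.symm
      simp [pvMin, PySem.Chars.startswith_iff, List.cons_prefix_cons]
    · obtain rfl : c = 'i' := by
        simp only [beq_iff_eq, String.toList] at hi
        exact (List.cons.injEq _ _ _ _ ▸ hi).1.symm
      simp [pvMin, PySem.Chars.startswith_iff, List.cons_prefix_cons]
    · obtain rfl : c = 's' := by
        simp only [beq_iff_eq, String.toList] at hs
        exact (List.cons.injEq _ _ _ _ ▸ hs).1.symm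
      simp [pvMin, PySem.Chars.startswith_iff, List.cons_prefix_cons]
    · obtain rfl : c = 't' := by
        simp only [beq_iff_eq, String.toList] at ht
        exact (List.cons.injEq _ _ _ _ ▸ ht).1.symm
      simp [pvMin, PySem.Chars.startswith_iff, List.cons_prefix_cons]
    · obtain rfl : c = 'u' := by
        simp only [beq_iff_eq, String.toList] at hu
        exact (List.cons.injEq _ _ _ _ ▸ hu).1.symm
      simp [pvMin, PySem.Chars.startswith_iff, List.cons_prefix_cons]
    · obtain rfl : c = 'm' := by
        simp only [beq_iff_eq, String.toList] at hm
        exact (List.cons.injEq _ _ _ _ ▸ hm).1.symm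
      simp [pvMin, PySem.Chars.startswith_iff, List.cons_prefix_cons]
    ·
      have nn : ('n' : Char) ≠ c := fun h => hn (by rw [← h]; decide)
      have nl : ('l' : Char) ≠ c := fun h => hl (by rw [← h]; decide)
      have nc : ('c' : Char) ≠ c := fun h => hc (by rw [← h]; decide)
      have nf : ('f' : Char) ≠ c := fun h => hf (by rw [← h]; decide)
      have ni : ('i' : Char) ≠ c := fun h => hi (by rw [← h]; decide)
      have ns : ('s' : Char) ≠ c := fun h => hs (by rw [← h]; decide)
      have nt : ('t' : Char) ≠ c := fun h => ht (by rw [← h]; decide)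
      have nu : ('u' : Char) ≠ c := fun h => hu (by rw [← h]; decide)
      have nm : ('m' : Char) ≠ c := fun h => hm (by rw [← h]; decide)
      simp [pvMin, List.cons_prefix_cons, nn, nl, nc, nf, ni, ns, nt, nu, nm, PySem.Dict.get?]

theorem pv_append_prefix (p q l : List Char) :
    (p ++ q <+: l) ↔ p <+: l ∧ q <+: l.drop p.length := by
  constructor
  · rintro ⟨t, rfl⟩
    refine ⟨⟨q ++ t, by simp⟩, ?_⟩
    rw [List.drop_append_of_le_length (by simp), List.drop_left]
    exact ⟨t, rfl⟩
  · rintro ⟨⟨t, rfl⟩, hq⟩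
    simp only [List.drop_append_of_le_length le_rfl, List.drop_length, List.nil_append] at hq
    obtain ⟨u, rfl⟩ := hq
    exact ⟨u, by simp⟩

-- the test made at one position of the scan, as a proof-side abbreviation …
def pvHit (cs : List Char) : Bool :=
  PySem.Chars.startswith cs "drisk".toList && pvTailOk (PySem.List.slice cs (some 5) none)

-- … read as a prefix statement about stem+suffix
theorem pvHit_iff (cs : List Char) :
    pvHit cs = true ↔ ∃ m ∈ pvMin, ("drisk".toList ++ m) <+: cs := by
  rw [pvHit, Bool.and_eq_true, PySem.Chars.startswith_iff, PySem.List.slice_from cs (by norm_num),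
    pvTailOk_iff]
  have hlen : ("drisk".toList).length = 5 := rfl
  have ht : ((5 : Int)).toNat = 5 := rfl
  rw [ht]
  constructor
  · rintro ⟨hd, m, hm, hx⟩
    exact ⟨m, hm, (pv_append_prefix _ _ _).mpr ⟨hd, by rw [hlen]; exact hx⟩⟩
  · rintro ⟨m, hm, hx⟩
    obtain ⟨hd, hq⟩ := (pv_append_prefix _ _ _).mp hx
    exact ⟨hd, m, hm, by rw [hlen] at hq; exact hq⟩

theorem pvTailOkAt_eq (s : List Char) (j : Int) (hj : 0 ≤ j) :
    pvTailOkAt s j = pvTailOk (s.drop j.toNat) := by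
  unfold pvTailOkAt pvTailOk
  rw [PySem.List.slice_toNat s hj (by omega), PySem.List.slice_to _ (by norm_num)]
  have h1 : (j + 1).toNat - j.toNat = 1 := by omega
  have h2 : ((1 : Int)).toNat = 1 := rfl
  rw [h1, h2]

theorem pvHitAt_eq (s : List Char) (i : Int) (hi : 0 ≤ i) :
    (PySem.Chars.startswith (s.drop i.toNat) "drisk".toList && pvTailOkAt s (i + 5))
      = pvHit (s.drop i.toNat) := by
  unfold pvHit
  rw [pvTailOkAt_eq s _ (by omega), PySem.List.slice_from _ (by norm_num),
    List.drop_drop]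
  have : i.toNat + ((5 : Int)).toNat = (i + 5).toNat := by omega
  rw [this]

theorem pvScanLoop_iff (s : List Char) (is : List Int) (h : ∀ i ∈ is, 0 ≤ i) :
    pvScanLoop s is = true ↔ ∃ i ∈ is, pvHit (s.drop i.toNat) = true := by
  induction is with
  | nil => simp [pvScanLoop]
  | cons i rest ih =>
    have hi : 0 ≤ i := h i (by simp)
    simp only [pvScanLoop, pvHitAt_eq s i hi]
    split_ifs with hx
    · simp [hx]
    · rw [ih (fun k hk => h k (by simp [hk]))]
      simp [hx]

theorem pvScan_iff (l : List Char) :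
    pvScan l = true ↔ ∃ j, ∃ m ∈ pvMin, ("drisk".toList ++ m) <+: l.drop j := by
  rw [pvScan, pvScanLoop_iff l _ (fun i hi => ((PySem.List.mem_pyRange_one).mp hi).1)]
  constructor
  · rintro ⟨i, _, hhit⟩
    obtain ⟨m, hm, hx⟩ := (pvHit_iff _).mp hhit
    exact ⟨i.toNat, m, hm, hx⟩
  · rintro ⟨j, m, hm, hx⟩
    have hjlt : j < l.length := by
      by_contra hge
      rw [List.drop_eq_nil_of_le (by omega)] at hx
      rw [List.prefix_nil] at hx
      exact absurd hx (by simp)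
    refine ⟨(j : Int), (PySem.List.mem_pyRange_one).mpr ⟨by omega, by exact_mod_cast hjlt⟩, ?_⟩
    rw [Int.toNat_natCast]
    exact (pvHit_iff _).mpr ⟨m, hm, hx⟩

theorem pvALoop_iff (fu : List Char) (fs : List String) :
    pvALoop fu fs = true ↔ ∃ f ∈ fs, PySem.Chars.isIn (PySem.Chars.upper f.toList) fu = true := by
  induction fs with
  | nil => simp [pvALoop]
  | cons f rest ih =>
    simp only [pvALoop]
    split_ifs with h
    · simp [h]
    · simp [ih, h]

-- each minimal stem+suffix IS the lower-case of some attribute name …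
theorem pv_min_to_name :
    ∀ m ∈ pvMin, ∃ f ∈ pvAttrFunctions,
      "drisk".toList ++ m = PySem.Chars.lower f.toList := by decide

-- … and each attribute name's lower-case starts with some minimal stem+suffix
theorem pv_name_to_min :
    ∀ f ∈ pvAttrFunctions, ∃ m ∈ pvMin,
      ("drisk".toList ++ m) <+: PySem.Chars.lower f.toList := by decide

theorem pv_main (s : List Char) :
    pvALoop (PySem.Chars.upper s) pvAttrFunctions = pvScan (PySem.Chars.lower s) := by
  rw [Bool.eq_iff_iff, pvALoop_iff, pvScan_iff]
  constructor
  · rintro ⟨f, hf, hin⟩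
    obtain ⟨j, hj⟩ := (PySem.Chars.exists_prefix_drop_iff_isIn _ _).mpr hin
    obtain ⟨m, hm, hpre⟩ := pv_name_to_min f hf
    refine ⟨j, m, hm, ?_⟩
    have hlow : PySem.Chars.lower f.toList <+: (PySem.Chars.lower s).drop j := by
      have := (pv_prefix_case_iff f.toList (s.drop j)).mp (by
        simpa [PySem.Chars.upper, List.map_drop] using hj)
      simpa [PySem.Chars.lower, List.map_drop] using this
    exact hpre.trans hlow
  · rintro ⟨j, m, hm, hpre⟩
    obtain ⟨f, hf, hfe⟩ := pv_min_to_name m hm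
    refine ⟨f, hf, (PySem.Chars.exists_prefix_drop_iff_isIn _ _).mp ⟨j, ?_⟩⟩
    have hlow : PySem.Chars.lower f.toList <+: (PySem.Chars.lower s).drop j := hfe ▸ hpre
    have := (pv_prefix_case_iff f.toList (s.drop j)).mpr (by
      simpa [PySem.Chars.lower, List.map_drop] using hlow)
    simpa [PySem.Chars.upper, List.map_drop] using this

-- ===== VERDICT (by name: the statement is the Claim_ definition above) =====
theorem is_attribute_function_spec : Claim_equal_is_attribute_function := by
  intro formula _
  unfold Spec_is_attribute_function is_attribute_function is_attribute_function_alt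
  exact pv_main _
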